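-- pv_equiv track=rewrite | github.com/nitvishn/ProjectEuler | p079.py | buildPrecedenceDict
-- ===== SOURCE A (Python) =====
-- def buildPrecedenceDict(attempts):
--     precedence = {}
--     for attempt in attempts:
--         for i in range(len(attempt)):
--             char = attempt[i]
--             if precedence.get(char) == None:
--                 precedence[char] = {'before': set(), 'after': set()}
--             if i > 0:
--                 precedence[char]['before'].add(attempt[i-1])
--             if i < len(attempt) - 1:
--                 precedence[char]['after'].add(attempt[i+1])
--     return precedence
-- ===== SOURCE B (Python) =====
-- def buildPrecedenceDict(attempts):
--     pairs = [(a, b) for attempt in attempts for a, b in zip(attempt, attempt[1:])]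
--     order = []
--     for attempt in attempts:
--         for ch in attempt:
--             if ch not in order:
--                 order.append(ch)
--     return {ch: {'before': set(a for a, b in pairs if b == ch),
--                  'after': set(b for a, b in pairs if a == ch)}
--             for ch in order}
-- ===== Notes on version B (the rewrite author's own statement) =====
-- stated objective: alternative
-- what changed: Instead of A's single interleaved pass that mutates nested per-character dict entries position by position, B first materialises a global list of adjacent pairs and the first-occurrence order of characters, then builds the result in one dict comprehension, computing each character's before/after sets by filtering the pair list.
import Mathlib
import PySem

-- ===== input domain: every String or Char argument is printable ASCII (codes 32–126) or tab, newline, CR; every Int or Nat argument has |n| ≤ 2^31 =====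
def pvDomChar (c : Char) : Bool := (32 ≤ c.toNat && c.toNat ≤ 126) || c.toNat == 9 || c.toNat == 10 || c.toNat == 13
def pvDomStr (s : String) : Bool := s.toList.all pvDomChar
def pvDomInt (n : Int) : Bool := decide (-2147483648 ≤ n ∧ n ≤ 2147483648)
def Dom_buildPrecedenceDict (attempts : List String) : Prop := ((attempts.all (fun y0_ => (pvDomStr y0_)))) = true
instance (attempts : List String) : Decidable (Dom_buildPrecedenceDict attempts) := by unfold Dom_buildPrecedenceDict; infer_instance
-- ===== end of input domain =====

-- B replaces A's single interleaved pass that mutates nested per-character dict entries by a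
-- staged computation: a global adjacent-pair list and the first-occurrence character order are
-- built first, then the result dict is produced in one comprehension whose before/after sets
-- come from filtering the pair list; alternative decomposition, same observable result.

-- the fresh {'before': set(), 'after': set()} entry (used by both ports' transliterations)
def pvEntry0 : PySem.Dict String (List String) :=
  PySem.Dict.ofList [("before", ([] : List String)), ("after", ([] : List String))]

-- ===== PORT A =====
-- precedence[c][key].add(v)  (A's in-place set mutation)
def pvAdd (d : PySem.Dict String (PySem.Dict String (List String)))
    (c key v : String) : PySem.Dict String (PySem.Dict String (List String)) :=
  d.modify c pvEntry0 (fun m => m.modify key [] (fun s => PySem.Set.add s v))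

-- if precedence.get(char) == None: precedence[char] = {'before': set(), 'after': set()}
def pvEnsureA (d : PySem.Dict String (PySem.Dict String (List String))) (c : String) :
    PySem.Dict String (PySem.Dict String (List String)) :=
  if d.get? c = none then d.insert c pvEntry0 else d

-- the body 'for i in range(len(attempt))': prev = attempt[i-1] (exists iff i > 0),
-- rest's head = attempt[i+1] (exists iff i < len(attempt)-1)
def pvLoopA : PySem.Dict String (PySem.Dict String (List String)) → Option String → List Char →
    PySem.Dict String (PySem.Dict String (List String))
  | d, _, [] => d
  | d, prev, c :: rest =>
    let cs := String.singleton c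
    let d1 := pvEnsureA d cs
    let d2 := match prev with
      | some p => pvAdd d1 cs "before" p
      | none => d1
    let d3 := match rest with
      | b :: _ => pvAdd d2 cs "after" (String.singleton b)
      | [] => d2
    pvLoopA d3 (some cs) rest

def buildPrecedenceDict (attempts : List String) : List (String × List (String × List String)) :=
  ((attempts.foldl (fun d a => pvLoopA d none a.toList) PySem.Dict.empty).items.map
    (fun p => (p.1, p.2.items)))

-- ===== PORT B =====
-- iterating a Python str yields its 1-character strings
def pvSingles (a : String) : List String := a.toList.map String.singleton

-- pairs = [(a, b) for attempt in attempts for a, b in zip(attempt, attempt[1:])]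
def pvPairs (attempts : List String) : List (String × String) :=
  attempts.flatMap (fun a => (pvSingles a).zip (pvSingles a).tail)

-- order = []; for attempt in attempts: for ch in attempt: if ch not in order: order.append(ch)
def pvOrder (attempts : List String) : List String :=
  attempts.foldl
    (fun ord a => (pvSingles a).foldl (fun ord ch => if ch ∈ ord then ord else ord ++ [ch]) ord) []

-- {'before': set(a for a, b in pairs if b == ch), 'after': set(b for a, b in pairs if a == ch)}
def pvEntryB (pairs : List (String × String)) (ch : String) : PySem.Dict String (List String) :=
  PySem.Dict.ofList
    [("before", PySem.Set.ofList ((pairs.filter (fun p => p.2 == ch)).map (fun p => p.1))),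
     ("after",  PySem.Set.ofList ((pairs.filter (fun p => p.1 == ch)).map (fun p => p.2)))]

def buildPrecedenceDict_alt (attempts : List String) : List (String × List (String × List String)) :=
  let pairs := pvPairs attempts
  (((pvOrder attempts).foldl (fun d ch => d.insert ch (pvEntryB pairs ch)) PySem.Dict.empty).items.map
    (fun p => (p.1, p.2.items)))

-- ===== PRECONDITION & SPEC =====
def Spec_buildPrecedenceDict (attempts : List String) (out : List (String × List (String × List String))) : Prop := out = buildPrecedenceDict_alt attempts
instance (attempts : List String) (out : List (String × List (String × List String))) : Decidable (Spec_buildPrecedenceDict attempts out) := by unfold Spec_buildPrecedenceDict; infer_instance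

-- ===== CLAIM (what is proved, stated in full; the proofs are below) =====
def Claim_equal_buildPrecedenceDict : Prop := ∀ (attempts : List String), Dom_buildPrecedenceDict attempts → Spec_buildPrecedenceDict attempts (buildPrecedenceDict attempts)

-- ===== LEMMAS AND PROOFS =====

-- ---- the common intermediate form: a flat list of micro-events ----
inductive PvEv where
  | ens : String → PvEv
  | pair : String → String → PvEv

def pvStepEv (d : PySem.Dict String (PySem.Dict String (List String))) :
    PvEv → PySem.Dict String (PySem.Dict String (List String))
  | .ens k => d.setdefault k pvEntry0
  | .pair a b => pvAdd (pvAdd d a "after" b) b "before" a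

def pvEvsOf (cs : List Char) : List PvEv :=
  cs.map (fun c => PvEv.ens (String.singleton c)) ++
  (cs.zip cs.tail).map (fun p => PvEv.pair (String.singleton p.1) (String.singleton p.2))

def pvEvs (attempts : List String) : List PvEv := attempts.flatMap (fun a => pvEvsOf a.toList)

def pvEvKeys : PvEv → List String
  | .ens k => [k]
  | .pair a b => [a, b]

def pvRawB (es : List PvEv) (k : String) : List String :=
  es.filterMap (fun e => match e with | .pair a b => if b = k then some a else none | _ => none)
def pvRawA (es : List PvEv) (k : String) : List String :=
  es.filterMap (fun e => match e with | .pair a b => if a = k then some b else none | _ => none)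

def pvEntryMk (bs as_ : List String) : PySem.Dict String (List String) :=
  PySem.Dict.mk [("before", bs), ("after", as_)]

-- ---- step 1: A's nested loop is the event fold ----

theorem pv_insert_comm_absent (d : PySem.Dict String (PySem.Dict String (List String)))
    (k c : String) (w v : PySem.Dict String (List String))
    (hk : d.contains k = true) (hc : d.contains c = false) :
    (d.insert k w).insert c v = (d.insert c v).insert k w := by
  have hne : c ≠ k := by intro h; subst h; rw [hk] at hc; cases hc
  have h1 : (d.insert k w).contains c = false := by
    rw [PySem.Dict.contains_insert]; simp [hne, hc]
  have h2 : (d.insert c v).contains k = true := by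
    rw [PySem.Dict.contains_insert]; simp [hk]
  apply PySem.Dict.ext
  rw [PySem.Dict.items_insert_of_not_contains _ v h1,
      PySem.Dict.items_insert_of_contains _ w h2,
      PySem.Dict.items_insert_of_contains d w hk,
      PySem.Dict.items_insert_of_not_contains d v hc,
      List.map_append]
  simp [hne]

theorem pv_contains_pvAdd (d : PySem.Dict String (PySem.Dict String (List String)))
    (c key v : String) (x : String) :
    (pvAdd d c key v).contains x = ((x == c) || d.contains x) := by
  simp [pvAdd, PySem.Dict.modify, PySem.Dict.contains_insert]

theorem pv_contains_ensureA (d : PySem.Dict String (PySem.Dict String (List String)))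
    (c : String) (x : String) (hx : d.contains x = true) :
    (pvEnsureA d c).contains x = true := by
  unfold pvEnsureA
  split
  · simp [PySem.Dict.contains_insert, hx]
  · exact hx

theorem pv_contains_ensureA_self (d : PySem.Dict String (PySem.Dict String (List String)))
    (c : String) : (pvEnsureA d c).contains c = true := by
  unfold pvEnsureA
  split
  · exact PySem.Dict.contains_insert_self d c pvEntry0
  · rename_i h
    rw [PySem.Dict.contains_eq_isSome_get?]
    cases hg : d.get? c
    · exact absurd hg h
    · simp

theorem pv_ensureA_eq_setdefault (d : PySem.Dict String (PySem.Dict String (List String)))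
    (c : String) : pvEnsureA d c = d.setdefault c pvEntry0 := by
  unfold pvEnsureA
  by_cases h : d.contains c = true
  · rw [PySem.Dict.setdefault_of_contains d pvEntry0 h]
    have : d.get? c ≠ none := by
      rw [PySem.Dict.contains_eq_isSome_get?] at h
      cases hg : d.get? c
      · rw [hg] at h; cases h
      · simp
    simp [this]
  · have hf : d.contains c = false := by revert h; cases d.contains c <;> simp
    rw [PySem.Dict.setdefault_of_not_contains d pvEntry0 hf]
    have : d.get? c = none := by
      rw [PySem.Dict.get?_eq_none_iff_contains]; exact hf
    simp [this, PySem.Dict.insert, hf]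

theorem pv_ensureA_pvAdd_comm (d : PySem.Dict String (PySem.Dict String (List String)))
    (k c key v : String) (hk : d.contains k = true) :
    pvEnsureA (pvAdd d k key v) c = pvAdd (pvEnsureA d c) k key v := by
  by_cases hc : d.contains c = true
  · have h1 : (pvAdd d k key v).contains c = true := by
      rw [pv_contains_pvAdd]; simp [hc]
    have e1 : pvEnsureA (pvAdd d k key v) c = pvAdd d k key v := by
      unfold pvEnsureA
      have : (pvAdd d k key v).get? c ≠ none := by
        rw [PySem.Dict.contains_eq_isSome_get?] at h1
        cases hg : (pvAdd d k key v).get? c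
        · rw [hg] at h1; cases h1
        · simp
      simp [this]
    have e2 : pvEnsureA d c = d := by
      unfold pvEnsureA
      have : d.get? c ≠ none := by
        rw [PySem.Dict.contains_eq_isSome_get?] at hc
        cases hg : d.get? c
        · rw [hg] at hc; cases hc
        · simp
      simp [this]
    rw [e1, e2]
  · have hcf : d.contains c = false := by revert hc; cases d.contains c <;> simp
    have hne : c ≠ k := by intro h; subst h; rw [hk] at hcf; cases hcf
    have h1 : (pvAdd d k key v).contains c = false := by
      rw [pv_contains_pvAdd]; simp [hcf, hne]
    have e1 : pvEnsureA (pvAdd d k key v) c = (pvAdd d k key v).insert c pvEntry0 := by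
      unfold pvEnsureA
      have : (pvAdd d k key v).get? c = none := by
        rw [PySem.Dict.get?_eq_none_iff_contains]; exact h1
      simp [this]
    have e2 : pvEnsureA d c = d.insert c pvEntry0 := by
      unfold pvEnsureA
      have : d.get? c = none := by
        rw [PySem.Dict.get?_eq_none_iff_contains]; exact hcf
      simp [this]
    rw [e1, e2]
    unfold pvAdd PySem.Dict.modify
    rw [PySem.Dict.getD_insert_of_ne d pvEntry0 pvEntry0 (Ne.symm hne)]
    exact pv_insert_comm_absent d k c _ pvEntry0 hk hcf

def pvInit (d : PySem.Dict String (PySem.Dict String (List String))) (cs : List Char) :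
    PySem.Dict String (PySem.Dict String (List String)) :=
  cs.foldl (fun d c => pvEnsureA d (String.singleton c)) d

theorem pv_init_pvAdd_comm (cs : List Char) :
    ∀ (d : PySem.Dict String (PySem.Dict String (List String))) (k key v : String),
    d.contains k = true → pvInit (pvAdd d k key v) cs = pvAdd (pvInit d cs) k key v := by
  induction cs with
  | nil => intro d k key v _; rfl
  | cons c rest ih =>
    intro d k key v hk
    show pvInit (pvEnsureA (pvAdd d k key v) (String.singleton c)) rest
        = pvAdd (pvInit (pvEnsureA d (String.singleton c)) rest) k key v
    rw [pv_ensureA_pvAdd_comm d k (String.singleton c) key v hk]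
    exact ih (pvEnsureA d (String.singleton c)) k key v
      (pv_contains_ensureA d (String.singleton c) k hk)

def pvAdds : Option String → List Char → PySem.Dict String (PySem.Dict String (List String)) →
    PySem.Dict String (PySem.Dict String (List String))
  | _, [], d => d
  | prev, c :: rest, d =>
    let cs := String.singleton c
    let d2 := match prev with
      | some p => pvAdd d cs "before" p
      | none => d
    let d3 := match rest with
      | b :: _ => pvAdd d2 cs "after" (String.singleton b)
      | [] => d2
    pvAdds (some cs) rest d3

theorem pv_loopA_eq (cs : List Char) :
    ∀ (prev : Option String) (d : PySem.Dict String (PySem.Dict String (List String))),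
    pvLoopA d prev cs = pvAdds prev cs (pvInit d cs) := by
  induction cs with
  | nil => intro prev d; rfl
  | cons c rest ih =>
    intro prev d
    show pvLoopA _ (some (String.singleton c)) rest = _
    rw [ih]
    have hcont : ∀ (d' : PySem.Dict String (PySem.Dict String (List String))),
        d'.contains (String.singleton c) = true →
        ∀ key v, (pvAdd d' (String.singleton c) key v).contains (String.singleton c) = true := by
      intro d' h key v
      rw [pv_contains_pvAdd]; simp [h]
    have h0 := pv_contains_ensureA_self d (String.singleton c)
    cases prev with
    | none =>
      cases rest with
      | nil => rfl
      | cons b rest' =>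
        show pvAdds _ _ (pvInit (pvAdd (pvEnsureA d (String.singleton c)) (String.singleton c)
            "after" (String.singleton b)) (b :: rest')) = _
        rw [pv_init_pvAdd_comm (b :: rest') _ _ _ _ h0]
        rfl
    | some p =>
      cases rest with
      | nil =>
        show pvAdds _ _ (pvInit (pvAdd (pvEnsureA d (String.singleton c)) (String.singleton c)
            "before" p) []) = _
        rfl
      | cons b rest' =>
        show pvAdds _ _ (pvInit (pvAdd (pvAdd (pvEnsureA d (String.singleton c))
            (String.singleton c) "before" p) (String.singleton c)
            "after" (String.singleton b)) (b :: rest')) = _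
        rw [pv_init_pvAdd_comm (b :: rest') _ _ _ _ (hcont _ h0 "before" p),
            pv_init_pvAdd_comm (b :: rest') _ _ _ _ h0]
        rfl

def pvPairFold (d : PySem.Dict String (PySem.Dict String (List String)))
    (l : List (Char × Char)) : PySem.Dict String (PySem.Dict String (List String)) :=
  l.foldl (fun d p => pvAdd (pvAdd d (String.singleton p.1) "after" (String.singleton p.2))
    (String.singleton p.2) "before" (String.singleton p.1)) d

theorem pv_adds_eq_pairFold (cs : List Char) :
    ∀ (prev : Option String) (d : PySem.Dict String (PySem.Dict String (List String))),
    pvAdds prev cs d = pvPairFold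
      (match prev, cs with
        | some p, c :: _ => pvAdd d (String.singleton c) "before" p
        | _, _ => d) (cs.zip cs.tail) := by
  induction cs with
  | nil => intro prev d; cases prev <;> rfl
  | cons c rest ih =>
    intro prev d
    cases rest with
    | nil => cases prev <;> rfl
    | cons b rest' =>
      cases prev with
      | none =>
        show pvAdds (some (String.singleton c)) (b :: rest')
            (pvAdd d (String.singleton c) "after" (String.singleton b)) = _
        rw [ih (some (String.singleton c))]
        rfl
      | some p =>
        show pvAdds (some (String.singleton c)) (b :: rest')
            (pvAdd (pvAdd d (String.singleton c) "before" p) (String.singleton c)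
              "after" (String.singleton b)) = _
        rw [ih (some (String.singleton c))]
        rfl

theorem pv_loopA_evs (d : PySem.Dict String (PySem.Dict String (List String)))
    (cs : List Char) : pvLoopA d none cs = (pvEvsOf cs).foldl pvStepEv d := by
  rw [pv_loopA_eq cs none d, pv_adds_eq_pairFold cs none (pvInit d cs)]
  unfold pvEvsOf
  rw [List.foldl_append, List.foldl_map, List.foldl_map]
  have hinit : pvInit d cs = cs.foldl (fun d c => pvStepEv d (PvEv.ens (String.singleton c))) d := by
    unfold pvInit
    congr 1
    funext d c
    exact pv_ensureA_eq_setdefault d (String.singleton c)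
  rw [hinit]
  rfl

theorem pv_A_evs (attempts : List String) :
    ∀ (d : PySem.Dict String (PySem.Dict String (List String))),
    attempts.foldl (fun d a => pvLoopA d none a.toList) d = (pvEvs attempts).foldl pvStepEv d := by
  induction attempts with
  | nil => intro d; rfl
  | cons a rest ih =>
    intro d
    show List.foldl _ (pvLoopA d none a.toList) rest = _
    rw [pvEvs, List.flatMap_cons, List.foldl_append, ih, pv_loopA_evs]
    rfl

-- ---- step 2: pointwise value of the event fold ----

theorem pv_mod_after (bs as_ : List String) (v : String) :
    (pvEntryMk bs as_).modify "after" [] (fun s => PySem.Set.add s v)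
      = pvEntryMk bs (PySem.Set.add as_ v) := rfl

theorem pv_mod_before (bs as_ : List String) (v : String) :
    (pvEntryMk bs as_).modify "before" [] (fun s => PySem.Set.add s v)
      = pvEntryMk (PySem.Set.add bs v) as_ := rfl

theorem pv_ofList_snoc (l : List String) (x : String) :
    PySem.Set.ofList (l ++ [x]) = PySem.Set.add (PySem.Set.ofList l) x := by
  simp [PySem.Set.ofList_eq_foldl]

theorem pv_getD_pvAdd (d : PySem.Dict String (PySem.Dict String (List String)))
    (c key v k : String) :
    (pvAdd d c key v).getD k pvEntry0
      = if k = c then (d.getD c pvEntry0).modify key [] (fun s => PySem.Set.add s v)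
        else d.getD k pvEntry0 := by
  unfold pvAdd
  rw [PySem.Dict.getD_modify]

theorem pv_getD_fold (es : List PvEv) :
    ∀ (k : String), ((es.foldl pvStepEv PySem.Dict.empty).getD k pvEntry0)
      = pvEntryMk (PySem.Set.ofList (pvRawB es k)) (PySem.Set.ofList (pvRawA es k)) := by
  induction es using List.reverseRecOn with
  | nil => intro k; rfl
  | append_singleton es e ih =>
    intro k
    rw [List.foldl_append]
    cases e with
    | ens c =>
      have hrB : pvRawB (es ++ [PvEv.ens c]) k = pvRawB es k := by
        unfold pvRawB; rw [List.filterMap_append]; simp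
      have hrA : pvRawA (es ++ [PvEv.ens c]) k = pvRawA es k := by
        unfold pvRawA; rw [List.filterMap_append]; simp
      rw [hrB, hrA]
      show ((es.foldl pvStepEv PySem.Dict.empty).setdefault c pvEntry0).getD k pvEntry0 = _
      by_cases hk : k = c
      · subst hk
        rw [PySem.Dict.getD_setdefault_self]
        exact ih k
      · rw [PySem.Dict.getD_eq_get?_getD, PySem.Dict.get?_setdefault_of_ne _ _ hk,
            ← PySem.Dict.getD_eq_get?_getD]
        exact ih k
    | pair a b =>
      show (pvAdd (pvAdd (es.foldl pvStepEv PySem.Dict.empty) a "after" b) b "before" a).getD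
          k pvEntry0 = _
      rw [pv_getD_pvAdd]
      by_cases hkb : k = b
      · subst hkb
        rw [if_pos rfl, pv_getD_pvAdd]
        by_cases hka : k = a
        · subst hka
          rw [if_pos rfl, ih k, pv_mod_after, pv_mod_before]
          unfold pvRawB pvRawA
          rw [List.filterMap_append, List.filterMap_append]
          simp [pv_ofList_snoc]
        · have hak : a ≠ k := fun h => hka h.symm
          rw [if_neg hka, ih k, pv_mod_before]
          unfold pvRawB pvRawA
          rw [List.filterMap_append, List.filterMap_append]
          simp [pv_ofList_snoc, hak]
      · have hbk : b ≠ k := fun h => hkb h.symm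
        rw [if_neg hkb, pv_getD_pvAdd]
        by_cases hka : k = a
        · subst hka
          rw [if_pos rfl, ih k, pv_mod_after]
          unfold pvRawB pvRawA
          rw [List.filterMap_append, List.filterMap_append]
          simp [pv_ofList_snoc, hbk]
        · have hak : a ≠ k := fun h => hka h.symm
          rw [if_neg hka, ih k]
          unfold pvRawB pvRawA
          rw [List.filterMap_append, List.filterMap_append]
          simp [hbk, hak]

-- ---- step 3: keys of the event fold ----

theorem pv_keys_setdefault (d : PySem.Dict String (PySem.Dict String (List String)))
    (k : String) (v : PySem.Dict String (List String)) :
    (d.setdefault k v).keys = PySem.Set.add d.keys k := by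
  rw [PySem.Dict.keys_setdefault]
  by_cases h : d.contains k = true
  · have := (PySem.Dict.contains_iff_mem_keys d k).mp h
    simp [PySem.Set.add, PySem.Set.contains, this, h]
  · have hm : ¬ k ∈ d.keys := fun hm => h ((PySem.Dict.contains_iff_mem_keys d k).mpr hm)
    simp [PySem.Set.add, PySem.Set.contains, hm, h]

theorem pv_keys_pvAdd (d : PySem.Dict String (PySem.Dict String (List String)))
    (c key v : String) : (pvAdd d c key v).keys = PySem.Set.add d.keys c := by
  unfold pvAdd PySem.Dict.modify
  by_cases h : d.contains c = true
  · rw [PySem.Dict.keys_insert_of_contains _ _ h]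
    have := (PySem.Dict.contains_iff_mem_keys d c).mp h
    simp [PySem.Set.add, PySem.Set.contains, this]
  · have hf : d.contains c = false := by revert h; cases d.contains c <;> simp
    rw [PySem.Dict.keys_insert_of_not_contains _ _ hf]
    have hm : ¬ c ∈ d.keys := fun hm => by
      rw [(PySem.Dict.contains_iff_mem_keys d c).mpr hm] at hf; cases hf
    simp [PySem.Set.add, PySem.Set.contains, hm]

theorem pv_update_append (s : List String) (l1 l2 : List String) :
    PySem.Set.update s (l1 ++ l2) = PySem.Set.update (PySem.Set.update s l1) l2 := by
  simp [PySem.Set.update, List.foldl_append]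

theorem pv_keys_stepEv (d : PySem.Dict String (PySem.Dict String (List String))) (e : PvEv) :
    (pvStepEv d e).keys = PySem.Set.update d.keys (pvEvKeys e) := by
  cases e with
  | ens k =>
    show (d.setdefault k pvEntry0).keys = PySem.Set.update d.keys [k]
    rw [pv_keys_setdefault]
    rfl
  | pair a b =>
    show (pvAdd (pvAdd d a "after" b) b "before" a).keys = PySem.Set.update d.keys [a, b]
    rw [pv_keys_pvAdd, pv_keys_pvAdd]
    rfl

theorem pv_keys_fold (es : List PvEv) :
    ∀ (d : PySem.Dict String (PySem.Dict String (List String))),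
    (es.foldl pvStepEv d).keys = PySem.Set.update d.keys (es.flatMap pvEvKeys) := by
  induction es with
  | nil => intro d; rfl
  | cons e rest ih =>
    intro d
    show (rest.foldl pvStepEv (pvStepEv d e)).keys = _
    rw [ih, pv_keys_stepEv, List.flatMap_cons, pv_update_append]

-- ---- step 4: the order list ----

theorem pv_add_of_mem (s : List String) (x : String) (h : x ∈ s) : PySem.Set.add s x = s := by
  simp [PySem.Set.add, PySem.Set.contains, h]

theorem pv_if_eq_add (s : List String) (x : String) :
    (if x ∈ s then s else s ++ [x]) = PySem.Set.add s x := by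
  by_cases h : x ∈ s
  · rw [if_pos h, pv_add_of_mem s x h]
  · rw [if_neg h]
    simp [PySem.Set.add, PySem.Set.contains, h]

theorem pv_ordstep (l : List String) :
    ∀ (s : List String),
    l.foldl (fun ord ch => if ch ∈ ord then ord else ord ++ [ch]) s = PySem.Set.update s l := by
  induction l with
  | nil => intro s; rfl
  | cons c rest ih =>
    intro s
    show rest.foldl _ (if c ∈ s then s else s ++ [c]) = _
    rw [pv_if_eq_add, ih]
    rfl

theorem pv_mem_add_left (s : List String) (x y : String) (h : x ∈ s) : x ∈ PySem.Set.add s y := by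
  unfold PySem.Set.add
  split
  · exact h
  · exact List.mem_append_left _ h

theorem pv_mem_update_left (l : List String) :
    ∀ (s : List String) (x : String), x ∈ s → x ∈ PySem.Set.update s l := by
  induction l with
  | nil => intro s x h; exact h
  | cons c rest ih =>
    intro s x h
    exact ih (PySem.Set.add s c) x (pv_mem_add_left s x c h)

theorem pv_mem_add_self (s : List String) (x : String) : x ∈ PySem.Set.add s x := by
  by_cases h : x ∈ s
  · rw [pv_add_of_mem s x h]; exact h
  · simp [PySem.Set.add, PySem.Set.contains, h]

theorem pv_mem_update_right (l : List String) :
    ∀ (s : List String) (x : String), x ∈ l → x ∈ PySem.Set.update s l := by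
  induction l with
  | nil => intro s x h; cases h
  | cons c rest ih =>
    intro s x h
    rcases List.mem_cons.mp h with h | h
    · subst h
      exact pv_mem_update_left rest (PySem.Set.add s x) x (pv_mem_add_self s x)
    · exact ih (PySem.Set.add s c) x h

theorem pv_update_of_subset (l : List String) :
    ∀ (s : List String), (∀ x ∈ l, x ∈ s) → PySem.Set.update s l = s := by
  induction l with
  | nil => intro s _; rfl
  | cons c rest ih =>
    intro s h
    show PySem.Set.update (PySem.Set.add s c) rest = s
    rw [pv_add_of_mem s c (h c (List.mem_cons_self))]
    exact ih s (fun x hx => h x (List.mem_cons_of_mem _ hx))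

theorem pv_evKeys_attempt (cs : List Char) (s : List String) :
    PySem.Set.update s ((pvEvsOf cs).flatMap pvEvKeys)
      = PySem.Set.update s (cs.map String.singleton) := by
  unfold pvEvsOf
  rw [List.flatMap_append, pv_update_append]
  have h1 : (cs.map (fun c => PvEv.ens (String.singleton c))).flatMap pvEvKeys
      = cs.map String.singleton := by
    rw [List.flatMap_map]
    induction cs with
    | nil => rfl
    | cons c rest ih =>
      rw [List.flatMap_cons, List.map_cons, ih]
      rfl
  rw [h1]
  apply pv_update_of_subset
  intro x hx
  rw [List.mem_flatMap] at hx
  obtain ⟨e, he, hxe⟩ := hx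
  rw [List.mem_map] at he
  obtain ⟨p, hp, rfl⟩ := he
  have hmem : p.1 ∈ cs ∧ p.2 ∈ cs.tail := List.of_mem_zip hp
  have h2 : p.2 ∈ cs := List.mem_of_mem_tail hmem.2
  have hxe' : x = String.singleton p.1 ∨ x = String.singleton p.2 := by
    simpa [pvEvKeys] using hxe
  rcases hxe' with rfl | rfl
  · exact pv_mem_update_right _ _ _ (List.mem_map.mpr ⟨p.1, hmem.1, rfl⟩)
  · exact pv_mem_update_right _ _ _ (List.mem_map.mpr ⟨p.2, h2, rfl⟩)

theorem pv_order_fold (attempts : List String) :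
    ∀ (s : List String),
    attempts.foldl
        (fun ord a => (pvSingles a).foldl (fun ord ch => if ch ∈ ord then ord else ord ++ [ch]) ord) s
      = PySem.Set.update s (attempts.flatMap (fun a => (pvEvsOf a.toList).flatMap pvEvKeys)) := by
  induction attempts with
  | nil => intro s; rfl
  | cons a rest ih =>
    intro s
    rw [List.foldl_cons, List.flatMap_cons, pv_update_append, pv_evKeys_attempt, ih,
        pv_ordstep]
    rfl

theorem pv_order_eq (attempts : List String) :
    pvOrder attempts = PySem.Set.update [] ((pvEvs attempts).flatMap pvEvKeys) := by
  unfold pvOrder pvEvs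
  rw [pv_order_fold]
  congr 1
  induction attempts with
  | nil => rfl
  | cons a rest ih =>
    rw [List.flatMap_cons, List.flatMap_cons, List.flatMap_append, ih]

-- ---- step 5: raw neighbour lists are the filtered pair list ----

theorem pv_fm_filter_snd (l : List (String × String)) (k : String) :
    l.filterMap (fun p => if p.2 = k then some p.1 else none)
      = (l.filter (fun p => p.2 == k)).map (fun p => p.1) := by
  induction l with
  | nil => rfl
  | cons p rest ih =>
    by_cases h : p.2 = k <;> simp [List.filterMap_cons, List.filter_cons, h, ih]

theorem pv_fm_filter_fst (l : List (String × String)) (k : String) :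
    l.filterMap (fun p => if p.1 = k then some p.2 else none)
      = (l.filter (fun p => p.1 == k)).map (fun p => p.2) := by
  induction l with
  | nil => rfl
  | cons p rest ih =>
    by_cases h : p.1 = k <;> simp [List.filterMap_cons, List.filter_cons, h, ih]

theorem pv_zip_singles (a : String) :
    (pvSingles a).zip (pvSingles a).tail
      = (a.toList.zip a.toList.tail).map (fun p => (String.singleton p.1, String.singleton p.2)) := by
  unfold pvSingles
  rw [← List.map_tail, List.zip_map]
  rfl

theorem pv_rawB_attempt (cs : List Char) (k : String) :
    pvRawB (pvEvsOf cs) k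
      = ((((cs.zip cs.tail).map (fun p => (String.singleton p.1, String.singleton p.2))).filter
          (fun p => p.2 == k)).map (fun p => p.1)) := by
  unfold pvRawB pvEvsOf
  rw [List.filterMap_append, ← pv_fm_filter_snd]
  have h1 : (cs.map (fun c => PvEv.ens (String.singleton c))).filterMap
      (fun e => match e with | .pair a b => if b = k then some a else none | _ => none) = [] := by
    rw [List.filterMap_map]
    induction cs with
    | nil => rfl
    | cons c rest ih => simpa [List.filterMap_cons] using ih
  rw [h1, List.nil_append, List.filterMap_map, List.filterMap_map]
  rfl

theorem pv_rawA_attempt (cs : List Char) (k : String) :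
    pvRawA (pvEvsOf cs) k
      = ((((cs.zip cs.tail).map (fun p => (String.singleton p.1, String.singleton p.2))).filter
          (fun p => p.1 == k)).map (fun p => p.2)) := by
  unfold pvRawA pvEvsOf
  rw [List.filterMap_append, ← pv_fm_filter_fst]
  have h1 : (cs.map (fun c => PvEv.ens (String.singleton c))).filterMap
      (fun e => match e with | .pair a b => if a = k then some b else none | _ => none) = [] := by
    rw [List.filterMap_map]
    induction cs with
    | nil => rfl
    | cons c rest ih => simpa [List.filterMap_cons] using ih
  rw [h1, List.nil_append, List.filterMap_map, List.filterMap_map]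
  rfl

theorem pv_rawB_pairs (attempts : List String) (k : String) :
    pvRawB (pvEvs attempts) k
      = (((pvPairs attempts).filter (fun p => p.2 == k)).map (fun p => p.1)) := by
  induction attempts with
  | nil => rfl
  | cons a rest ih =>
    unfold pvEvs pvPairs
    rw [List.flatMap_cons, List.flatMap_cons]
    unfold pvRawB
    rw [List.filterMap_append, List.filter_append, List.map_append]
    rw [pv_zip_singles a]
    exact congrArg₂ _ (pv_rawB_attempt a.toList k) ih

theorem pv_rawA_pairs (attempts : List String) (k : String) :
    pvRawA (pvEvs attempts) k
      = (((pvPairs attempts).filter (fun p => p.1 == k)).map (fun p => p.2)) := by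
  induction attempts with
  | nil => rfl
  | cons a rest ih =>
    unfold pvEvs pvPairs
    rw [List.flatMap_cons, List.flatMap_cons]
    unfold pvRawA
    rw [List.filterMap_append, List.filter_append, List.map_append]
    rw [pv_zip_singles a]
    exact congrArg₂ _ (pv_rawA_attempt a.toList k) ih

-- ---- step 6: assembly ----

theorem pv_entryB_eq (attempts : List String) (k : String) :
    pvEntryMk (PySem.Set.ofList (pvRawB (pvEvs attempts) k))
        (PySem.Set.ofList (pvRawA (pvEvs attempts) k))
      = pvEntryB (pvPairs attempts) k := by
  rw [pv_rawB_pairs, pv_rawA_pairs]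
  rfl

theorem pv_order_nodup (attempts : List String) : (pvOrder attempts).Nodup := by
  rw [pv_order_eq]
  have : PySem.Set.update ([] : List String) ((pvEvs attempts).flatMap pvEvKeys)
      = PySem.Set.ofList ((pvEvs attempts).flatMap pvEvKeys) := rfl
  rw [this]
  exact PySem.Set.nodup_ofList _

theorem pv_keys_A (attempts : List String) :
    ((pvEvs attempts).foldl pvStepEv PySem.Dict.empty).keys = pvOrder attempts := by
  rw [pv_keys_fold, pv_order_eq]
  rfl

-- ===== VERDICT (by name: the statement is the Claim_ definition above) =====
theorem buildPrecedenceDict_spec : Claim_equal_buildPrecedenceDict := by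
  intro attempts _
  unfold Spec_buildPrecedenceDict buildPrecedenceDict buildPrecedenceDict_alt
  rw [pv_A_evs attempts PySem.Dict.empty]
  have hnodup : ((pvEvs attempts).foldl pvStepEv PySem.Dict.empty).keys.Nodup := by
    rw [pv_keys_A]; exact pv_order_nodup attempts
  have hitemsA : ((pvEvs attempts).foldl pvStepEv PySem.Dict.empty).items
      = (pvOrder attempts).map (fun k => (k, pvEntryB (pvPairs attempts) k)) := by
    rw [PySem.Dict.items_eq_map_keys _ hnodup pvEntry0, pv_keys_A]
    apply List.map_congr_left
    intro k _
    rw [pv_getD_fold (pvEvs attempts) k, pv_entryB_eq]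
  have hitemsB : ((pvOrder attempts).foldl
        (fun d ch => d.insert ch (pvEntryB (pvPairs attempts) ch)) PySem.Dict.empty).items
      = (pvOrder attempts).map (fun k => (k, pvEntryB (pvPairs attempts) k)) := by
    have := PySem.Dict.items_foldl_insert_fresh (l := pvOrder attempts)
      (k := fun ch => ch) (v := fun ch => pvEntryB (pvPairs attempts) ch)
      (d := PySem.Dict.empty)
      (by intro a _; exact PySem.Dict.contains_empty a)
      (by simpa using pv_order_nodup attempts)
    simpa using this
  show (((pvEvs attempts).foldl pvStepEv PySem.Dict.empty).items.map (fun p => (p.1, p.2.items)))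
    = (((pvOrder attempts).foldl (fun d ch => d.insert ch (pvEntryB (pvPairs attempts) ch))
        PySem.Dict.empty).items.map (fun p => (p.1, p.2.items)))
  rw [hitemsA, hitemsB]
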